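-- pv_equiv track=rewrite | github.com/Pritz69/GFG_POTD | Ticket_Counter.py | distributeTicket
-- ===== SOURCE A (Python) =====
-- def distributeTicket(N : int, K : int) -> int:
--     # Code Here
--     i=0
--     j=N-1
--     ans=0
--     f=0
--     while (True) :
--         for x in range(K) :
--             if i==j :
--                 ans=i+1
--                 f=1
--                 break
--             i +=1
--         if f==1 :
--             break
--         for y in range(K) :
--             if i==j :
--                 ans=j+1
--                 f=1
--                 break
--             j -=1
--         if f==1 :
--             break
--     return ans
-- ===== SOURCE B (Python) =====
-- def distributeTicket(N: int, K: int) -> int: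
--     # Closed form: meeting happens after N-1 single steps taken in alternating
--     # blocks of K (i first). i's total advance gives the meeting index directly.
--     q, r = divmod(N - 1, K)
--     return K * ((q + 1) // 2) + (r if q % 2 == 0 else 0) + 1
-- ===== Notes on version B (the rewrite author's own statement) =====
-- stated objective: faster
-- what changed: Replaces the step-by-step alternating two-pointer simulation with a closed-form arithmetic formula on (N-1) divmod K (block index parity gives who meets and where).
import Mathlib
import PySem

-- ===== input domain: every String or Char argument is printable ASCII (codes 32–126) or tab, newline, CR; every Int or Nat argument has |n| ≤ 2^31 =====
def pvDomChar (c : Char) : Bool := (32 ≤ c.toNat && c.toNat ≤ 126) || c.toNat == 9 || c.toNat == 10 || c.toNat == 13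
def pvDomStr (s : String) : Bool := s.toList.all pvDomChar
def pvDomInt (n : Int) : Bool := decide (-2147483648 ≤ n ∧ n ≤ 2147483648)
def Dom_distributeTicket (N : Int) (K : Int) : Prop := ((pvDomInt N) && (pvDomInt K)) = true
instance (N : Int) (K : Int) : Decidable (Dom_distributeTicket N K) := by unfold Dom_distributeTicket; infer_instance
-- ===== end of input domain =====

-- B replaces A's alternating two-pointer simulation by a closed-form divmod formula (O(1) vs O(N)).


-- ===== PORT A =====
-- inner 'for x in range(K)': advances i, may set ans/f and break; returns (i, ans, f)
def pvForI : Nat → Int → Int → Int → Int → Int × Int × Int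
  | 0, i, _, ans, f => (i, ans, f)
  | k + 1, i, j, ans, f =>
    if i = j then (i, i + 1, 1) else pvForI k (i + 1) j ans f

-- inner 'for y in range(K)': decrements j, may set ans/f and break; returns (j, ans, f)
def pvForJ : Nat → Int → Int → Int → Int → Int × Int × Int
  | 0, _, j, ans, f => (j, ans, f)
  | k + 1, i, j, ans, f =>
    if i = j then (j, j + 1, 1) else pvForJ k i (j - 1) ans f

-- the 'while True' loop; fuel only makes the transcription total (never exhausted on Pre_)
def pvWhile (K : Int) : Nat → Int → Int → Int → Int → Int
  | 0, _, _, ans, _ => ans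
  | fuel + 1, i, j, ans, f =>
    let r1 := pvForI K.toNat i j ans f
    if r1.2.2 = 1 then r1.2.1
    else
      let r2 := pvForJ K.toNat r1.1 j r1.2.1 r1.2.2
      if r2.2.2 = 1 then r2.2.1
      else pvWhile K fuel r1.1 r2.1 r2.2.1 r2.2.2

def distributeTicket (N : Int) (K : Int) : Int :=
  pvWhile K (N.natAbs + 2) 0 (N - 1) 0 0

-- ===== PORT B =====
def distributeTicket_alt (N : Int) (K : Int) : Int :=
  let q := PySem.Int.floordiv (N - 1) K
  let r := PySem.Int.mod (N - 1) K
  K * PySem.Int.floordiv (q + 1) 2 + (if PySem.Int.mod q 2 = 0 then r else 0) + 1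

-- ===== PRECONDITION & SPEC =====
-- Pre_ excludes N < 1 or K < 1, on which Python A loops forever (never returns).
def Pre_distributeTicket (N : Int) (K : Int) : Prop := 1 ≤ N ∧ 1 ≤ K
instance (N : Int) (K : Int) : Decidable (Pre_distributeTicket N K) := by unfold Pre_distributeTicket; infer_instance
def pvWitness_distributeTicket : Int × Int := (5, 2)

def Spec_distributeTicket (N : Int) (K : Int) (out : Int) : Prop := out = distributeTicket_alt N K
instance (N : Int) (K : Int) (out : Int) : Decidable (Spec_distributeTicket N K out) := by unfold Spec_distributeTicket; infer_instance

-- ===== CLAIM (what is proved, stated in full; the proofs are below) =====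
def Claim_equal_distributeTicket : Prop := ∀ (N : Int) (K : Int), Dom_distributeTicket N K → Pre_distributeTicket N K → Spec_distributeTicket N K (distributeTicket N K)

-- ===== LEMMAS AND PROOFS =====

theorem pvForI_hit (k : Nat) (i j ans f : Int) (h0 : 0 ≤ j - i) (h1 : j - i < (k : Int)) :
    pvForI k i j ans f = (j, j + 1, 1) := by
  induction k generalizing i with
  | zero => omega
  | succ k ih =>
    by_cases hij : i = j
    · simp [pvForI, hij]
    · rw [pvForI, if_neg hij]
      exact ih (i + 1) (by omega) (by push_cast at h1 ⊢; omega)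

theorem pvForI_miss (k : Nat) (i j ans f : Int) (h : j - i < 0 ∨ (k : Int) ≤ j - i) :
    pvForI k i j ans f = (i + k, ans, f) := by
  induction k generalizing i with
  | zero => simp [pvForI]
  | succ k ih =>
    have hij : i ≠ j := by push_cast at h; omega
    rw [pvForI, if_neg hij, ih (i + 1) (by push_cast at h ⊢; omega)]
    push_cast; ring_nf

theorem pvForJ_hit (k : Nat) (i j ans f : Int) (h0 : 0 ≤ j - i) (h1 : j - i < (k : Int)) :
    pvForJ k i j ans f = (i, i + 1, 1) := by
  induction k generalizing j with
  | zero => omega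
  | succ k ih =>
    by_cases hij : i = j
    · simp [pvForJ, hij]
    · rw [pvForJ, if_neg hij]
      exact ih (j - 1) (by omega) (by push_cast at h1 ⊢; omega)

theorem pvForJ_miss (k : Nat) (i j ans f : Int) (h : j - i < 0 ∨ (k : Int) ≤ j - i) :
    pvForJ k i j ans f = (j - k, ans, f) := by
  induction k generalizing j with
  | zero => simp [pvForJ]
  | succ k ih =>
    have hij : i ≠ j := by push_cast at h; omega
    rw [pvForJ, if_neg hij, ih (j - 1) (by push_cast at h ⊢; omega)]
    push_cast; ring_nf

-- B's closed form generalized to a window starting at i with gap g = j - i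
def pvMeet (K i g : Int) : Int :=
  i + K * ((g / K + 1) / 2) + (if (g / K) % 2 = 0 then g % K else 0) + 1

theorem pvWhile_eq_meet (K : Int) (hK : 1 ≤ K) (fuel : Nat) :
    ∀ (i j ans : Int), 0 ≤ j - i → j - i < 2 * K * (fuel : Int) →
      pvWhile K fuel i j ans 0 = pvMeet K i (j - i) := by
  induction fuel with
  | zero =>
    intro i j ans h0 h1
    simp only [Nat.cast_zero, mul_zero] at h1; omega
  | succ fuel ih =>
    intro i j ans h0 h1
    have hKt : ((K.toNat : Nat) : Int) = K := by omega
    have hdm := Int.mul_ediv_add_emod (j - i) K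
    have hr0 : 0 ≤ (j - i) % K := Int.emod_nonneg (j - i) (by omega)
    have hrK : (j - i) % K < K := Int.emod_lt_of_pos (j - i) (by omega)
    by_cases hcase1 : j - i < K
    · -- first inner loop meets: answer j + 1
      have hq : (j - i) / K = 0 := Int.ediv_eq_zero_of_lt h0 hcase1
      have hmul : K * ((j - i) / K) = 0 := by rw [hq]; ring
      rw [pvWhile, pvForI_hit K.toNat i j ans 0 h0 (by omega)]
      simp only [pvMeet, hq]
      norm_num; omega
    · -- first inner loop misses
      rw [pvWhile, pvForI_miss K.toNat i j ans 0 (by omega)]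
      simp only [if_neg (by norm_num : ¬ (0:Int) = 1)]
      by_cases hcase2 : j - i < 2 * K
      · -- second inner loop meets: answer i + K + 1
        have hq : (j - i) / K = 1 := by
          have hz : (j - i - K) / K = 0 := Int.ediv_eq_zero_of_lt (by omega) (by omega)
          have h2 : (j - i - K + 1 * K) / K = (j - i - K) / K + 1 := Int.add_mul_ediv_right _ 1 (by omega)
          simp at h2; omega
        have hmul : K * ((j - i) / K) = K := by rw [hq]; ring
        rw [pvForJ_hit K.toNat (i + K.toNat) j ans 0 (by omega) (by omega)]
        simp only [pvMeet, hq]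
        norm_num; omega
      · -- both miss: recurse on the shrunken window
        rw [pvForJ_miss K.toNat (i + K.toNat) j ans 0 (by omega)]
        simp only [if_neg (by norm_num : ¬ (0:Int) = 1)]
        have hexp : 2 * K * ((fuel + 1 : Nat) : Int) = 2 * K * (fuel : Int) + 2 * K := by
          push_cast; ring
        rw [ih (i + K.toNat) (j - K.toNat) ans (by omega) (by omega)]
        -- pvMeet shifts: gap drops by 2K, quotient by 2, remainder and parity unchanged
        have hg' : (j - K.toNat) - (i + K.toNat) = (j - i) - 2 * K := by omega
        have hq' : ((j - i) - 2 * K) / K = (j - i) / K - 2 := by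
          have h2 : ((j - i) - 2 * K + 2 * K) / K = ((j - i) - 2 * K) / K + 2 := Int.add_mul_ediv_right _ 2 (by omega)
          simp at h2; omega
        have hr' : ((j - i) - 2 * K) % K = (j - i) % K := by
          have hdm2 := Int.mul_ediv_add_emod ((j - i) - 2 * K) K
          rw [hq'] at hdm2
          have hring : K * ((j - i) / K - 2) = K * ((j - i) / K) - 2 * K := by ring
          omega
        have hq2 : ((j - i) / K - 2 + 1) / 2 = ((j - i) / K + 1) / 2 - 1 := by omega
        have hp : ((j - i) / K - 2) % 2 = ((j - i) / K) % 2 := by omega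
        simp only [pvMeet, hg', hq', hr', hq2, hp]
        rw [hKt]
        split_ifs <;> ring

-- ===== VERDICT (by name: the statement is the Claim_ definition above) =====
theorem distributeTicket_spec : Claim_equal_distributeTicket := by
  intro N K _ hPre
  obtain ⟨hN, hK⟩ := hPre
  show distributeTicket N K = distributeTicket_alt N K
  unfold distributeTicket
  have hfuel : N - 1 - 0 < 2 * K * ((N.natAbs + 2 : Nat) : Int) := by
    have hc : N - 1 < ((N.natAbs + 2 : Nat) : Int) := by omega
    have hc0 : (0:Int) ≤ ((N.natAbs + 2 : Nat) : Int) := by positivity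
    have h1 : ((N.natAbs + 2 : Nat) : Int) ≤ K * ((N.natAbs + 2 : Nat) : Int) :=
      le_mul_of_one_le_left hc0 hK
    have h2 : 2 * K * ((N.natAbs + 2 : Nat) : Int) = K * ((N.natAbs + 2 : Nat) : Int) + K * ((N.natAbs + 2 : Nat) : Int) := by ring
    omega
  rw [pvWhile_eq_meet K hK _ 0 (N - 1) 0 (by omega) hfuel]
  have e1 : PySem.Int.floordiv (N - 1) K = (N - 1) / K :=
    PySem.Int.floordiv_eq_ediv_of_pos (by omega)
  have e2 : PySem.Int.mod (N - 1) K = (N - 1) % K :=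
    PySem.Int.mod_eq_emod_of_pos (by omega)
  have e3 : PySem.Int.floordiv ((N - 1) / K + 1) 2 = ((N - 1) / K + 1) / 2 :=
    PySem.Int.floordiv_eq_ediv_of_pos (by norm_num)
  have e4 : PySem.Int.mod ((N - 1) / K) 2 = ((N - 1) / K) % 2 :=
    PySem.Int.mod_eq_emod_of_pos (by norm_num)
  simp only [distributeTicket_alt, pvMeet, e1, e2, e3, e4]
  norm_num
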